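-- pv_equiv track=rewrite | github.com/chenchenzong/BUAL | ECCV2024_BUAL_code/utils.py | get_class_splits
-- ===== SOURCE A (Python) =====
-- def get_class_splits(dataset, num, split_idx=0):
--
--     if dataset in ('cifar10'):
--         train_classes = list(range(num))
--         open_set_classes = [x for x in range(10) if x not in train_classes]
--
--     elif dataset in ('cifar100'):
--         train_classes = list(range(num))
--         open_set_classes = [x for x in range(100) if x not in train_classes]
--
--     elif dataset in ('tinyimagenet'):
--         train_classes = list(range(num))
--         open_set_classes = [x for x in range(200) if x not in train_classes]
--     else:
--
--         raise NotImplementedError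
--
--     return train_classes, open_set_classes
-- ===== SOURCE B (Python) =====
-- def get_class_splits(dataset, num, split_idx=0):
--     if dataset in ('cifar10'):
--         total = 10
--     elif dataset in ('cifar100'):
--         total = 100
--     elif dataset in ('tinyimagenet'):
--         total = 200
--     else:
--         raise NotImplementedError
--     train_classes = list(range(num))
--     open_set_classes = list(range(max(num, 0), total))
--     return train_classes, open_set_classes
-- ===== Notes on version B (the rewrite author's own statement) =====
-- stated objective: simpler
-- what changed: Each branch only selects the class total; the open-set list is the closed-form range(max(num,0), total) instead of filtering range(total) through a membership scan of train_classes.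
import Mathlib
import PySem

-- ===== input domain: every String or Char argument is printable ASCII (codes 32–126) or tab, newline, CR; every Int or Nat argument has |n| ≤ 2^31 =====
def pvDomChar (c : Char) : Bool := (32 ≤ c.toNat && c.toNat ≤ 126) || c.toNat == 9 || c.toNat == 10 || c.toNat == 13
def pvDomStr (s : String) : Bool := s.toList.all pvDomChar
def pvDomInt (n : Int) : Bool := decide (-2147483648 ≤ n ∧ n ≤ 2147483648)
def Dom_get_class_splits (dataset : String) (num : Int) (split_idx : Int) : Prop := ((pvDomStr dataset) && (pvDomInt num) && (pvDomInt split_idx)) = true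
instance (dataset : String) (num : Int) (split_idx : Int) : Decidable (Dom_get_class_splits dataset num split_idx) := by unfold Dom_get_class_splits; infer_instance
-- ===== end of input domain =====

-- B keeps A's substring-matching branches but each branch only picks the class total;
-- the open-set list becomes the closed form range(max(num,0), total) instead of a
-- membership-filter of range(total) — objective: simpler.

-- ===== PORT A =====
def get_class_splits (dataset : String) (num : Int) (split_idx : Int) : List Int × List Int :=
  if PySem.Str.isIn dataset "cifar10" then
    let train_classes := PySem.List.pyRange 0 num 1
    let open_set_classes := (PySem.List.pyRange 0 10 1).filter (fun x => !(train_classes.contains x))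
    (train_classes, open_set_classes)
  else if PySem.Str.isIn dataset "cifar100" then
    let train_classes := PySem.List.pyRange 0 num 1
    let open_set_classes := (PySem.List.pyRange 0 100 1).filter (fun x => !(train_classes.contains x))
    (train_classes, open_set_classes)
  else if PySem.Str.isIn dataset "tinyimagenet" then
    let train_classes := PySem.List.pyRange 0 num 1
    let open_set_classes := (PySem.List.pyRange 0 200 1).filter (fun x => !(train_classes.contains x))
    (train_classes, open_set_classes)
  else ([], [])   -- Python raises NotImplementedError here; excluded by Pre_

-- ===== PORT B =====
def get_class_splits_alt (dataset : String) (num : Int) (split_idx : Int) : List Int × List Int :=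
  let total : Int :=
    if PySem.Str.isIn dataset "cifar10" then 10
    else if PySem.Str.isIn dataset "cifar100" then 100
    else if PySem.Str.isIn dataset "tinyimagenet" then 200
    else 0   -- Source B raises NotImplementedError here; excluded by Pre_
  (PySem.List.pyRange 0 num 1, PySem.List.pyRange (max num 0) total 1)

-- ===== PRECONDITION & SPEC =====
-- Pre_ excludes exactly the datasets that are a substring of none of the three names,
-- where A (and B) raise NotImplementedError.
def Pre_get_class_splits (dataset : String) (num : Int) (split_idx : Int) : Prop :=
  dataset.toList <:+: "cifar10".toList ∨ dataset.toList <:+: "cifar100".toList ∨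
  dataset.toList <:+: "tinyimagenet".toList
instance (dataset : String) (num : Int) (split_idx : Int) : Decidable (Pre_get_class_splits dataset num split_idx) := by unfold Pre_get_class_splits; infer_instance

def pvWitness_get_class_splits : String × Int × Int := ("cifar100", 5, 0)

def Spec_get_class_splits (dataset : String) (num : Int) (split_idx : Int) (out : List Int × List Int) : Prop := out = get_class_splits_alt dataset num split_idx
instance (dataset : String) (num : Int) (split_idx : Int) (out : List Int × List Int) : Decidable (Spec_get_class_splits dataset num split_idx out) := by unfold Spec_get_class_splits; infer_instance

-- ===== CLAIM (what is proved, stated in full; the proofs are below) =====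
def Claim_equal_get_class_splits : Prop := ∀ (dataset : String) (num : Int) (split_idx : Int), Dom_get_class_splits dataset num split_idx → Pre_get_class_splits dataset num split_idx → Spec_get_class_splits dataset num split_idx (get_class_splits dataset num split_idx)

-- ===== LEMMAS AND PROOFS =====

-- the heart: filtering range(total) by "not in range(num)" equals range(max(num,0), total)
theorem filter_not_mem_range (num total : Int) :
    (PySem.List.pyRange 0 total 1).filter
        (fun x => !((PySem.List.pyRange 0 num 1).contains x))
      = PySem.List.pyRange (max num 0) total 1 := by
  have hperm : List.Perm
      ((PySem.List.pyRange 0 total 1).filter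
        (fun x => !((PySem.List.pyRange 0 num 1).contains x)))
      (PySem.List.pyRange (max num 0) total 1) := by
    rw [List.perm_ext_iff_of_nodup
      ((PySem.List.nodup_pyRange_one 0 total).filter _)
      (PySem.List.nodup_pyRange_one _ total)]
    intro x
    simp [List.mem_filter, PySem.List.mem_pyRange_one]
    omega
  exact hperm.eq_of_pairwise
    (fun a b _ _ hab hba => absurd hab (lt_asymm hba))
    ((PySem.List.pairwise_lt_pyRange_one 0 total).filter _)
    (PySem.List.pairwise_lt_pyRange_one _ total)

-- ===== VERDICT (by name: the statement is the Claim_ definition above) =====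
theorem get_class_splits_spec : Claim_equal_get_class_splits := by
  intro dataset num split_idx _ hpre
  unfold Spec_get_class_splits get_class_splits get_class_splits_alt
  by_cases h1 : PySem.Str.isIn dataset "cifar10" = true
  · simp only [h1, if_pos]
    exact Prod.ext rfl (filter_not_mem_range num 10)
  · by_cases h2 : PySem.Str.isIn dataset "cifar100" = true
    · simp only [h1, h2, if_neg, if_pos, Bool.not_eq_true]
      exact Prod.ext rfl (filter_not_mem_range num 100)
    · by_cases h3 : PySem.Str.isIn dataset "tinyimagenet" = true
      · simp only [h1, h2, h3, if_neg, if_pos, Bool.not_eq_true]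
        exact Prod.ext rfl (filter_not_mem_range num 200)
      · rcases hpre with h | h | h
        · exact absurd ((PySem.Str.isIn_iff_infix dataset "cifar10").mpr h) h1
        · exact absurd ((PySem.Str.isIn_iff_infix dataset "cifar100").mpr h) h2
        · exact absurd ((PySem.Str.isIn_iff_infix dataset "tinyimagenet").mpr h) h3
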